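-- pv_equiv track=rewrite | github.com/idm-code/ai-video-factory | src/script_gen.py | _fallback_script
-- ===== SOURCE A (Python) =====
-- def _fallback_script(topic: str, target_minutes: int) -> str:
--     # ~150 wpm narration
--     target_words = target_minutes * 150
--     base = f"""
-- TITLE: I Tried {topic} for 7 Days — Here’s What Happened
--
-- HOOK:
-- People claim you can make money fast using AI and marketplaces like Etsy. So I tested it for 7 days from scratch.
--
-- SECTION 1 — What this side hustle is
-- Explain what the hustle is, why people believe it works, and what “digital products” are.
--
-- SECTION 2 — Tools used
-- Explain using AI to generate templates, editing with Canva, and how Etsy listings work.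
--
-- SECTION 3 — The 7-day plan
-- Describe Day 1 setup, Day 2-3 improving listings, Day 4-5 first traction, Day 6-7 results.
--
-- SECTION 4 — Results
-- Give realistic numbers: views, favorites, sales, revenue. Explain it’s not instant riches, but it proves demand.
--
-- SECTION 5 — What I’d do to scale
-- Volume of listings, niche focus, better thumbnails/previews, bundles, keyword research.
--
-- VERDICT:
-- Worth trying if you treat it like a volume game. Subscribe for the next experiment.
-- """
--     # Expand by repetition with varied phrasing to reach target length
--     blocks = [base.strip()]
--     while len(" ".join(blocks).split()) < target_words:
--         blocks.append(
--             f"\n\nSCALING TIP:\nHere’s another practical way to scale {topic}: improve listing keywords, offer bundles, and test pricing.\n"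
--             f"Add a short example and a mini-case study style paragraph about what happened on Day {len(blocks)+1}."
--         )
--     return "\n".join(blocks)
-- ===== SOURCE B (Python) =====
-- def _block(topic: str, day: int) -> str:
--     return (
--         f"\n\nSCALING TIP:\nHere’s another practical way to scale {topic}: improve listing keywords, offer bundles, and test pricing.\n"
--         f"Add a short example and a mini-case study style paragraph about what happened on Day {day}."
--     )
--
--
-- def _fallback_script(topic: str, target_minutes: int) -> str:
--     target_words = target_minutes * 150
--     base_str = f"""
-- TITLE: I Tried {topic} for 7 Days — Here’s What Happened
--
-- HOOK:
-- People claim you can make money fast using AI and marketplaces like Etsy. So I tested it for 7 days from scratch.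
--
-- SECTION 1 — What this side hustle is
-- Explain what the hustle is, why people believe it works, and what “digital products” are.
--
-- SECTION 2 — Tools used
-- Explain using AI to generate templates, editing with Canva, and how Etsy listings work.
--
-- SECTION 3 — The 7-day plan
-- Describe Day 1 setup, Day 2-3 improving listings, Day 4-5 first traction, Day 6-7 results.
--
-- SECTION 4 — Results
-- Give realistic numbers: views, favorites, sales, revenue. Explain it’s not instant riches, but it proves demand.
--
-- SECTION 5 — What I’d do to scale
-- Volume of listings, niche focus, better thumbnails/previews, bundles, keyword research.
--
-- VERDICT:
-- Worth trying if you treat it like a volume game. Subscribe for the next experiment.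
-- """.strip()
--     b0 = len(base_str.split())
--     # every appended block has the same word count (the day number is one glued word)
--     wb = len(_block(topic, 2).split())
--     k = 0 if b0 >= target_words else (target_words - b0 + wb - 1) // wb
--     return "\n".join([base_str] + [_block(topic, d) for d in range(2, k + 2)])
-- ===== Notes on version B (the rewrite author's own statement) =====
-- stated objective: simpler
-- what changed: Instead of a while loop that re-joins and re-splits the whole growing script to count words on every iteration, B measures the base and one sample SCALING-TIP block once (a block's word count is independent of the day number) and computes the number of extra blocks k in closed form with a ceiling division, then builds the list in one comprehension.
import Mathlib
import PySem

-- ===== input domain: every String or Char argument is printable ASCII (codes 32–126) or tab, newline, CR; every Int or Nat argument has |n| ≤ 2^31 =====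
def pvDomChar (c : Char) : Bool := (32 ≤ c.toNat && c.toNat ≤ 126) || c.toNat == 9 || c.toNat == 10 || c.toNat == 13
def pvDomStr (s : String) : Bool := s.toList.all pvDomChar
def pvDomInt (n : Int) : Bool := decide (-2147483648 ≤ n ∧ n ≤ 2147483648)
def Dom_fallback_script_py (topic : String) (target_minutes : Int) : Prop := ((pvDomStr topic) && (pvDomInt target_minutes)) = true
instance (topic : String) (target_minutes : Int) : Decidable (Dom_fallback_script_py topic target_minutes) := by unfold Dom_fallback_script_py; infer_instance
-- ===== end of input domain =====

-- B replaces A's while loop (which re-joins and re-splits the whole growing script to count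
-- words every iteration) by measuring the base and one sample block once and computing the
-- number of extra blocks in closed form (simpler; same return value).

-- ===== PORT A =====
-- Literal text of the Python f-strings (shared verbatim by A and B, as in the two sources).
def pvTitlePre : String := "\nTITLE: I Tried "
def pvTitlePost : String := " for 7 Days — Here’s What Happened\n\nHOOK:\nPeople claim you can make money fast using AI and marketplaces like Etsy. So I tested it for 7 days from scratch.\n\nSECTION 1 — What this side hustle is\nExplain what the hustle is, why people believe it works, and what “digital products” are.\n\nSECTION 2 — Tools used\nExplain using AI to generate templates, editing with Canva, and how Etsy listings work.\n\nSECTION 3 — The 7-day plan\nDescribe Day 1 setup, Day 2-3 improving listings, Day 4-5 first traction, Day 6-7 results.\n\nSECTION 4 — Results\nGive realistic numbers: views, favorites, sales, revenue. Explain it’s not instant riches, but it proves demand.\n\nSECTION 5 — What I’d do to scale\nVolume of listings, niche focus, better thumbnails/previews, bundles, keyword research.\n\nVERDICT:\nWorth trying if you treat it like a volume game. Subscribe for the next experiment.\n"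
def pvTipPre : String := "\n\nSCALING TIP:\nHere’s another practical way to scale "
def pvTipMid : String := ": improve listing keywords, offer bundles, and test pricing.\nAdd a short example and a mini-case study style paragraph about what happened on Day" ++ " "
-- base.strip() of the f-string base
def pvBaseStr (topic : String) : List Char :=
  PySem.Chars.strip (pvTitlePre.toList ++ topic.toList ++ pvTitlePost.toList)
-- the SCALING TIP f-string with holes topic and day
def pvTipBlock (topic : String) (day : Int) : List Char :=
  pvTipPre.toList ++ topic.toList ++ pvTipMid.toList ++ PySem.Int.toChars day ++ ['.']
-- len(" ".join(blocks).split())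
def pvWordCount (blocks : List (List Char)) : Nat :=
  (PySem.Chars.split₀ (PySem.Chars.join [' '] blocks)).length

-- Lemmas cited by pvLoopA's decreasing_by (each appended block contributes ≥ 1 word).
theorem goAcc : ∀ (s cur : List Char) (acc : List (List Char)),
    PySem.Chars.split₀.go s cur acc = acc.reverse ++ PySem.Chars.split₀.go s cur [] := by
  intro s
  induction s with
  | nil => intro cur acc; simp [PySem.Chars.split₀.go]; split <;> simp
  | cons c rest ih =>
      intro cur acc
      simp only [PySem.Chars.split₀.go]
      split
      · split
        · rw [ih [] acc]
        · rw [ih [] (cur.reverse :: acc), ih [] [cur.reverse]]; simp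
      · rw [ih (c :: cur) acc]

theorem goSpace : ∀ (a : List Char) (b cur : List Char),
    PySem.Chars.split₀.go (a ++ ' ' :: b) cur [] =
      PySem.Chars.split₀.go a cur [] ++ PySem.Chars.split₀.go b [] [] := by
  intro a
  induction a with
  | nil =>
      intro b cur
      simp only [List.nil_append, PySem.Chars.split₀.go]
      have hsp : PySem.Chars.isspace ' ' = true := by decide
      rw [hsp]
      simp only [if_true]
      split
      · simp
      · rw [goAcc b [] [List.reverse cur]]
  | cons c rest ih =>
      intro b cur
      simp only [List.cons_append, PySem.Chars.split₀.go]
      split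
      · split
        · rw [ih b []]
        · rw [goAcc (rest ++ ' ' :: b) [] [cur.reverse]]
          rw [ih b []]
          rw [goAcc rest [] [cur.reverse]]
          simp
      · rw [ih b (c :: cur)]

theorem goWord : ∀ (w : List Char), (∀ c ∈ w, PySem.Chars.isspace c = false) → ∀ cur,
    PySem.Chars.split₀.go w cur [] =
      if cur.reverse ++ w = [] then [] else [cur.reverse ++ w] := by
  intro w
  induction w with
  | nil => intro _ cur; simp only [PySem.Chars.split₀.go]; by_cases hc : cur = [] <;> simp [hc, List.isEmpty_iff]
  | cons c rest ih =>
      intro h cur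
      simp only [PySem.Chars.split₀.go]
      rw [h c (by simp)]
      simp only [Bool.false_eq_true, if_false]
      rw [ih (fun x hx => h x (by simp [hx])) (c :: cur)]
      simp

theorem split₀_append_space (a b : List Char) :
    PySem.Chars.split₀ (a ++ ' ' :: b) = PySem.Chars.split₀ a ++ PySem.Chars.split₀ b := by
  simp only [PySem.Chars.split₀]; exact goSpace a b []

theorem split₀_word (w : List Char) (hne : w ≠ []) (h : ∀ c ∈ w, PySem.Chars.isspace c = false) :
    PySem.Chars.split₀ w = [w] := by
  simp only [PySem.Chars.split₀]; rw [goWord w h []]; simp [hne]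

theorem digitChar_notspace (n : Nat) : PySem.Chars.isspace (Nat.digitChar n) = false := by
  rcases Nat.lt_or_ge n 16 with h | h
  · interval_cases n <;> decide
  · have hstar : Nat.digitChar n = '*' := by
      unfold Nat.digitChar
      have h0 : n ≠ 0 := by omega
      have h1 : n ≠ 1 := by omega
      have h2 : n ≠ 2 := by omega
      have h3 : n ≠ 3 := by omega
      have h4 : n ≠ 4 := by omega
      have h5 : n ≠ 5 := by omega
      have h6 : n ≠ 6 := by omega
      have h7 : n ≠ 7 := by omega
      have h8 : n ≠ 8 := by omega
      have h9 : n ≠ 9 := by omega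
      have h10 : n ≠ 10 := by omega
      have h11 : n ≠ 11 := by omega
      have h12 : n ≠ 12 := by omega
      have h13 : n ≠ 13 := by omega
      have h14 : n ≠ 14 := by omega
      have h15 : n ≠ 15 := by omega
      simp [h0, h1, h2, h3, h4, h5, h6, h7, h8, h9, h10, h11, h12, h13, h14, h15]
    rw [hstar]; decide

theorem toDigitsCore_notspace : ∀ (f n : Nat) (acc : List Char),
    (∀ c ∈ acc, PySem.Chars.isspace c = false) →
    ∀ c ∈ Nat.toDigitsCore 10 f n acc, PySem.Chars.isspace c = false := by
  intro f
  induction f with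
  | zero => intro n acc hacc; simpa [Nat.toDigitsCore] using hacc
  | succ f ih =>
      intro n acc hacc
      simp only [Nat.toDigitsCore]
      split
      · intro c hc
        rcases List.mem_cons.mp hc with h | h
        · subst h; exact digitChar_notspace _
        · exact hacc c h
      · exact ih _ _ (fun c hc => by
          rcases List.mem_cons.mp hc with h | h
          · subst h; exact digitChar_notspace _
          · exact hacc c h)

theorem toChars_notspace (d : Int) : ∀ c ∈ PySem.Int.toChars d, PySem.Chars.isspace c = false := by
  unfold PySem.Int.toChars
  split
  · intro c hc
    rcases List.mem_cons.mp hc with h | h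
    · subst h; decide
    · exact toDigitsCore_notspace _ _ [] (by simp) c h
  · exact toDigitsCore_notspace _ _ [] (by simp)

theorem join_append_singleton (sep : List Char) : ∀ (xs : List (List Char)) (y : List Char), xs ≠ [] →
    PySem.Chars.join sep (xs ++ [y]) = PySem.Chars.join sep xs ++ sep ++ y := by
  intro xs
  induction xs with
  | nil => simp
  | cons x rest ih =>
      intro y _
      cases rest with
      | nil => simp [PySem.Chars.join, List.intercalate]
      | cons z t =>
          have h1 : PySem.Chars.join sep ((x :: z :: t) ++ [y]) =
              x ++ sep ++ PySem.Chars.join sep ((z :: t) ++ [y]) := by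
            simp [PySem.Chars.join_cons_cons]
          rw [h1, ih y (by simp), PySem.Chars.join_cons_cons]
          simp


set_option maxRecDepth 8192 in
theorem pvTipMid_toList : pvTipMid.toList = (": improve listing keywords, offer bundles, and test pricing.\nAdd a short example and a mini-case study style paragraph about what happened on Day" : String).toList ++ [' '] := by decide

theorem tip_word_pos (topic : String) (d : Int) :
    1 ≤ (PySem.Chars.split₀ (pvTipBlock topic d)).length := by
  unfold pvTipBlock
  rw [pvTipMid_toList]
  have hre : pvTipPre.toList ++ topic.toList ++ ((": improve listing keywords, offer bundles, and test pricing.\nAdd a short example and a mini-case study style paragraph about what happened on Day" : String).toList ++ [' ']) ++ PySem.Int.toChars d ++ ['.'] =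
      (pvTipPre.toList ++ topic.toList ++ (": improve listing keywords, offer bundles, and test pricing.\nAdd a short example and a mini-case study style paragraph about what happened on Day" : String).toList) ++ ' ' :: (PySem.Int.toChars d ++ ['.']) := by
    simp
  rw [hre, split₀_append_space]
  rw [split₀_word (PySem.Int.toChars d ++ ['.']) (by simp) (by
    intro c hc
    rcases List.mem_append.mp hc with h | h
    · exact toChars_notspace d c h
    · simp at h; subst h; decide)]
  simp

theorem wordCount_append_tip (blocks : List (List Char)) (topic : String) (d : Int) :
    pvWordCount blocks < pvWordCount (blocks ++ [pvTipBlock topic d]) := by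
  cases blocks with
  | nil =>
      have := tip_word_pos topic d
      simp only [pvWordCount, List.nil_append]
      rw [PySem.Chars.join_singleton]
      simpa [PySem.Chars.join, List.intercalate, PySem.Chars.split₀, PySem.Chars.split₀.go] using this
  | cons x xs =>
      have hjoin := join_append_singleton [' '] (x :: xs) (pvTipBlock topic d) (by simp)
      have hre : PySem.Chars.join [' '] (x :: xs) ++ [' '] ++ pvTipBlock topic d =
          PySem.Chars.join [' '] (x :: xs) ++ ' ' :: pvTipBlock topic d := by simp
      have := tip_word_pos topic d
      simp only [pvWordCount, hjoin, hre, split₀_append_space, List.length_append]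
      omega

-- the while loop of A, over the list of blocks
def pvLoopA (topic : String) (target : Int) (blocks : List (List Char)) : List (List Char) :=
  if _h : (pvWordCount blocks : Int) < target then
    pvLoopA topic target (blocks ++ [pvTipBlock topic ((blocks.length : Int) + 1)])
  else blocks
termination_by (target - pvWordCount blocks).toNat
decreasing_by
  have := wordCount_append_tip blocks topic ((blocks.length : Int) + 1)
  omega

def fallback_script_py (topic : String) (target_minutes : Int) : String :=
  String.ofList (PySem.Chars.join ['\n'] (pvLoopA topic (target_minutes * 150) [pvBaseStr topic]))

-- ===== PORT B =====
def fallback_script_py_alt (topic : String) (target_minutes : Int) : String :=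
  let target_words := target_minutes * 150
  let base_str := pvBaseStr topic
  let b0 := (PySem.Chars.split₀ base_str).length
  let wb := (PySem.Chars.split₀ (pvTipBlock topic 2)).length
  let k : Int := if (b0 : Int) ≥ target_words then 0
                 else PySem.Int.floordiv (target_words - b0 + wb - 1) wb
  String.ofList (PySem.Chars.join ['\n']
    (base_str :: (PySem.List.pyRange 2 (k + 2) 1).map (fun d => pvTipBlock topic d)))

-- ===== PRECONDITION & SPEC =====
def Spec_fallback_script_py (topic : String) (target_minutes : Int) (out : String) : Prop := out = fallback_script_py_alt topic target_minutes
instance (topic : String) (target_minutes : Int) (out : String) : Decidable (Spec_fallback_script_py topic target_minutes out) := by unfold Spec_fallback_script_py; infer_instance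

-- ===== CLAIM (what is proved, stated in full; the proofs are below) =====
def Claim_equal_fallback_script_py : Prop := ∀ (topic : String) (target_minutes : Int), Dom_fallback_script_py topic target_minutes → Spec_fallback_script_py topic target_minutes (fallback_script_py topic target_minutes)

-- ===== LEMMAS AND PROOFS =====
def pvB0 (topic : String) : Nat := (PySem.Chars.split₀ (pvBaseStr topic)).length
def pvWb (topic : String) : Nat := (PySem.Chars.split₀ (pvTipBlock topic 2)).length
def pvBlocksOf (topic : String) (j : Nat) : List (List Char) :=
  pvBaseStr topic :: (PySem.List.pyRange 2 (2 + (j : Int)) 1).map (fun d => pvTipBlock topic d)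

theorem wc_tip (topic : String) (d : Int) :
    (PySem.Chars.split₀ (pvTipBlock topic d)).length = pvWb topic := by
  have key : ∀ e : Int, (PySem.Chars.split₀ (pvTipBlock topic e)).length =
      (PySem.Chars.split₀ (pvTipPre.toList ++ topic.toList ++ (": improve listing keywords, offer bundles, and test pricing.\nAdd a short example and a mini-case study style paragraph about what happened on Day" : String).toList)).length + 1 := by
    intro e
    unfold pvTipBlock
    rw [pvTipMid_toList]
    have hre : pvTipPre.toList ++ topic.toList ++ ((": improve listing keywords, offer bundles, and test pricing.\nAdd a short example and a mini-case study style paragraph about what happened on Day" : String).toList ++ [' ']) ++ PySem.Int.toChars e ++ ['.'] =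
        (pvTipPre.toList ++ topic.toList ++ (": improve listing keywords, offer bundles, and test pricing.\nAdd a short example and a mini-case study style paragraph about what happened on Day" : String).toList) ++ ' ' :: (PySem.Int.toChars e ++ ['.']) := by
      simp
    rw [hre, split₀_append_space]
    rw [split₀_word (PySem.Int.toChars e ++ ['.']) (by simp) (by
      intro c hc
      rcases List.mem_append.mp hc with h | h
      · exact toChars_notspace e c h
      · simp at h; subst h; decide)]
    simp
  rw [key d]; unfold pvWb; rw [key 2]

theorem pyRange_len (j : Nat) : (PySem.List.pyRange 2 (2 + (j : Int)) 1).length = j := by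
  induction j with
  | zero => decide
  | succ j ih =>
      have hcast : 2 + ((j + 1 : Nat) : Int) = (2 + (j : Int)) + 1 := by push_cast; ring
      rw [hcast, PySem.List.pyRange_one_succ_right (by omega)]
      simp only [List.length_append, List.length_cons, List.length_nil, ih]

theorem blocksOf_zero (topic : String) : pvBlocksOf topic 0 = [pvBaseStr topic] := by
  unfold pvBlocksOf
  have h0 : PySem.List.pyRange 2 (2 + ((0 : Nat) : Int)) 1 = [] := by decide
  rw [h0]
  rfl

theorem blocksOf_succ (topic : String) (j : Nat) :
    pvBlocksOf topic (j + 1) = pvBlocksOf topic j ++ [pvTipBlock topic (2 + (j : Int))] := by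
  unfold pvBlocksOf
  have hcast : 2 + ((j + 1 : Nat) : Int) = (2 + (j : Int)) + 1 := by push_cast; ring
  rw [hcast, PySem.List.pyRange_one_succ_right (by omega)]
  simp

theorem blocksOf_length (topic : String) (j : Nat) : (pvBlocksOf topic j).length = j + 1 := by
  unfold pvBlocksOf
  rw [List.length_cons, List.length_map, pyRange_len]

theorem count_blocksOf (topic : String) (j : Nat) :
    pvWordCount (pvBlocksOf topic j) = pvB0 topic + j * pvWb topic := by
  induction j with
  | zero =>
      rw [blocksOf_zero]
      simp only [pvWordCount, pvB0]
      rw [PySem.Chars.join_singleton]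
      simp
  | succ j ih =>
      rw [blocksOf_succ]
      have hne : pvBlocksOf topic j ≠ [] := by unfold pvBlocksOf; simp
      have hjoin := join_append_singleton [' '] (pvBlocksOf topic j) (pvTipBlock topic (2 + (j : Int))) hne
      have hre : PySem.Chars.join [' '] (pvBlocksOf topic j) ++ [' '] ++ pvTipBlock topic (2 + (j : Int)) =
          PySem.Chars.join [' '] (pvBlocksOf topic j) ++ ' ' :: pvTipBlock topic (2 + (j : Int)) := by simp
      simp only [pvWordCount] at ih ⊢
      rw [hjoin, hre, split₀_append_space, List.length_append, ih, wc_tip]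
      ring

theorem loop_to_K (topic : String) (t : Int) (K : Nat)
    (hK : t ≤ (pvB0 topic : Int) + (K : Int) * (pvWb topic : Int))
    (hmin : ∀ j : Nat, j < K → (pvB0 topic : Int) + (j : Int) * (pvWb topic : Int) < t) :
    ∀ (n j : Nat), K - j ≤ n → j ≤ K →
      pvLoopA topic t (pvBlocksOf topic j) = pvBlocksOf topic K := by
  intro n
  induction n with
  | zero =>
      intro j hn hj
      have hj : j = K := by omega
      subst hj
      rw [pvLoopA]
      rw [dif_neg]
      rw [count_blocksOf]
      push_cast
      omega
  | succ n ih =>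
      intro j h1 h2
      rcases Nat.lt_or_ge j K with hlt | hge
      · rw [pvLoopA, dif_pos]
        · have hday : ((pvBlocksOf topic j).length : Int) + 1 = 2 + (j : Int) := by
            rw [blocksOf_length]; push_cast; ring
          rw [hday, ← blocksOf_succ]
          exact ih (j + 1) (by omega) (by omega)
        · rw [count_blocksOf]; push_cast
          have := hmin j hlt
          push_cast at this
          omega
      · have hj : j = K := by omega
        subst hj
        rw [pvLoopA, dif_neg]
        rw [count_blocksOf]
        push_cast
        omega

-- ===== VERDICT (by name: the statement is the Claim_ definition above) =====
theorem alt_def (topic : String) (tm : Int) : fallback_script_py_alt topic tm =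
    String.ofList (PySem.Chars.join ['\n'] (pvBaseStr topic ::
      (PySem.List.pyRange 2
        ((if ((PySem.Chars.split₀ (pvBaseStr topic)).length : Int) ≥ tm * 150 then 0
          else PySem.Int.floordiv
            (tm * 150 - ((PySem.Chars.split₀ (pvBaseStr topic)).length : Int) +
              ((PySem.Chars.split₀ (pvTipBlock topic 2)).length : Int) - 1)
            ((PySem.Chars.split₀ (pvTipBlock topic 2)).length : Int)) + 2) 1).map
        (fun d => pvTipBlock topic d))) := rfl

theorem fallback_script_py_spec : Claim_equal_fallback_script_py := by
  intro topic tm _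
  unfold Spec_fallback_script_py
  show fallback_script_py topic tm = fallback_script_py_alt topic tm
  rw [fallback_script_py, alt_def]
  set t := tm * 150 with ht
  have hwb : 1 ≤ pvWb topic := tip_word_pos topic 2
  by_cases hge : (pvB0 topic : Int) ≥ t
  · -- no extra blocks
    have hA : pvLoopA topic t [pvBaseStr topic] = pvBlocksOf topic 0 := by
      rw [← blocksOf_zero]
      exact loop_to_K topic t 0 (by simpa using hge) (by omega) 0 0 (by omega) (by omega)
    rw [hA, blocksOf_zero]
    have hge' : ((PySem.Chars.split₀ (pvBaseStr topic)).length : Int) ≥ t := hge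
    rw [if_pos hge']
    have h0 : PySem.List.pyRange 2 ((0 : Int) + 2) 1 = [] := by decide
    rw [h0]
    rfl
  · -- k extra blocks
    set k : Int := PySem.Int.floordiv (t - (pvB0 topic : Int) + (pvWb topic : Int) - 1) (pvWb topic : Int) with hk
    have hbounds := (PySem.Int.floordiv_eq_iff_of_pos (a := t - (pvB0 topic : Int) + (pvWb topic : Int) - 1)
        (b := (pvWb topic : Int)) (q := k) (by exact_mod_cast hwb)).mp rfl
    obtain ⟨hb1, hb2⟩ := hbounds
    have hlt : (pvB0 topic : Int) < t := by omega
    have hkpos : 1 ≤ k := by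
      by_contra hcon
      rw [not_le] at hcon
      have h1 : (k + 1) * (pvWb topic : Int) ≤ 1 * (pvWb topic : Int) :=
        mul_le_mul_of_nonneg_right (by omega) (by positivity)
      nlinarith
    have hKcast : ((k.toNat : Nat) : Int) = k := Int.toNat_of_nonneg (by omega)
    have hx2 : t - (pvB0 topic : Int) + (pvWb topic : Int) - 1 < k * (pvWb topic : Int) + (pvWb topic : Int) := by
      calc t - (pvB0 topic : Int) + (pvWb topic : Int) - 1 < (k + 1) * (pvWb topic : Int) := hb2
        _ = k * (pvWb topic : Int) + (pvWb topic : Int) := by ring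
    have hA : pvLoopA topic t [pvBaseStr topic] = pvBlocksOf topic k.toNat := by
      rw [← blocksOf_zero]
      refine loop_to_K topic t k.toNat ?_ ?_ k.toNat 0 (by omega) (by omega)
      · rw [hKcast]; omega
      · intro j hj
        have hj' : (j : Int) ≤ k - 1 := by omega
        have hmul : (j : Int) * (pvWb topic : Int) ≤ (k - 1) * (pvWb topic : Int) :=
          mul_le_mul_of_nonneg_right hj' (by positivity)
        nlinarith
    rw [hA]
    have hge' : ¬ ((PySem.Chars.split₀ (pvBaseStr topic)).length : Int) ≥ t := hge
    rw [if_neg hge']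
    have hkeq : PySem.Int.floordiv
        (t - ((PySem.Chars.split₀ (pvBaseStr topic)).length : Int) +
          ((PySem.Chars.split₀ (pvTipBlock topic 2)).length : Int) - 1)
        ((PySem.Chars.split₀ (pvTipBlock topic 2)).length : Int) = k := by rw [hk]; rfl
    rw [hkeq]
    unfold pvBlocksOf
    have h2 : k + 2 = 2 + ((k.toNat : Nat) : Int) := by omega
    rw [h2]
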